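-- pv_equiv track=rewrite | github.com/ruifchaves/GSR | Trabalhos & Testes/TP1/SNMPkeyShare/MIB.py | get_next_oids
-- ===== SOURCE A (Python) =====
-- def get_next_oids(oid, count):
--     result = []
--     current_string = oid
--     possibilities = ["1.1.1.0", "1.1.2.0", "1.1.3.0", "1.1.4.0", "1.1.5.0", "1.1.6.0", "1.2.1.0", "1.2.2.0", "1.2.3.0", "1.3.1.0"]
--
--     for _ in range(count):
--         result.append(current_string)
--         parts = current_string.split('.')
--         parts[-2] = str(int(parts[-2]) + 1)
--         current_string = '.'.join(parts)
--
--     return result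
-- ===== SOURCE B (Python) =====
-- def get_next_oids(oid, count):
--     if count <= 0:
--         return []
--     parts = oid.split('.')
--     base = int(parts[-2])
--     result = [oid]
--     for i in range(1, count):
--         parts[-2] = str(base + i)
--         result.append('.'.join(parts))
--     return result
-- ===== Notes on version B (the rewrite author's own statement) =====
-- stated objective: simpler
-- what changed: B splits the OID once and parses its second-to-last field once, then builds every following OID directly as str(base+i) at that index, replacing A's feed-the-previous-string-back chain of re-split/re-parse/re-join per iteration; the first element is the input string verbatim in both.
import Mathlib
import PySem

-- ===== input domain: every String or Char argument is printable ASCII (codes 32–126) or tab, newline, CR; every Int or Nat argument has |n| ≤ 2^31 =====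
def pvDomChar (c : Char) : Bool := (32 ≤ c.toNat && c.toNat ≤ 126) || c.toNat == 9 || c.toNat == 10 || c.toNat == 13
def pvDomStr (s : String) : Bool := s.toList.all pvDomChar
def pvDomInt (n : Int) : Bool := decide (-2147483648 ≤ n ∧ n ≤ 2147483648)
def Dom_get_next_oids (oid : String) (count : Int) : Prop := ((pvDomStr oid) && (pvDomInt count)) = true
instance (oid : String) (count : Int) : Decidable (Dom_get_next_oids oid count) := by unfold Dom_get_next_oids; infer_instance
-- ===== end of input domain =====

-- B splits the OID once, parses the second-to-last field once, and builds each successive OID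
-- directly as str(base+i) at that index, instead of A's re-split/re-parse/re-join feedback chain.


-- ===== PORT A =====
-- `split('.')` has a nonempty separator, so `PySem.Str.split?` is always `some`; the `.getD`
-- defaults on `pyGetD`/`ofStr?`/`pySetD` are reachable only where the Python raises
-- (fewer than two fields, or an unparsable field), which Pre_get_next_oids excludes.
def get_next_oids (oid : String) (count : Int) : List String :=
  let _possibilities : List String := ["1.1.1.0", "1.1.2.0", "1.1.3.0", "1.1.4.0", "1.1.5.0",
    "1.1.6.0", "1.2.1.0", "1.2.2.0", "1.2.3.0", "1.3.1.0"]
  ((PySem.List.pyRange 0 count 1).foldl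
    (fun st _ =>
      let result := st.1 ++ [st.2]
      let parts := (PySem.Str.split? st.2 ".").getD []
      let v := (PySem.Int.ofStr? (PySem.List.pyGetD parts (-2) "")).getD 0
      let parts2 := PySem.List.pySetD parts (-2) (PySem.Int.toStr (v + 1))
      (result, PySem.Str.join "." parts2))
    ([], oid)).1

-- ===== PORT B =====
def get_next_oids_alt (oid : String) (count : Int) : List String :=
  if count ≤ 0 then []
  else
    let parts := (PySem.Str.split? oid ".").getD []
    let base := (PySem.Int.ofStr? (PySem.List.pyGetD parts (-2) "")).getD 0
    (PySem.List.pyRange 1 count 1).foldl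
      (fun res i =>
        res ++ [PySem.Str.join "." (PySem.List.pySetD parts (-2) (PySem.Int.toStr (base + i)))])
      [oid]

-- ===== PRECONDITION & SPEC =====
-- Pre_ excludes exactly the inputs where the Python A raises: count > 0 with fewer than two
-- '.'-separated fields (IndexError) or a second-to-last field int() cannot parse (ValueError).
def Pre_get_next_oids (oid : String) (count : Int) : Prop :=
  0 < count →
    2 ≤ ((PySem.Str.split? oid ".").getD []).length ∧
    (PySem.Int.ofStr? (PySem.List.pyGetD ((PySem.Str.split? oid ".").getD []) (-2) "")).isSome = true
instance (oid : String) (count : Int) : Decidable (Pre_get_next_oids oid count) := by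
  unfold Pre_get_next_oids; infer_instance

def pvWitness_get_next_oids : String × Int := ("1.3.6.1.4.1.0", 3)

def Spec_get_next_oids (oid : String) (count : Int) (out : List String) : Prop := out = get_next_oids_alt oid count
instance (oid : String) (count : Int) (out : List String) : Decidable (Spec_get_next_oids oid count out) := by unfold Spec_get_next_oids; infer_instance

-- ===== CLAIM (what is proved, stated in full; the proofs are below) =====
def Claim_equal_get_next_oids : Prop := ∀ (oid : String) (count : Int), Dom_get_next_oids oid count → Pre_get_next_oids oid count → Spec_get_next_oids oid count (get_next_oids oid count)

-- ===== LEMMAS AND PROOFS =====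

-- `PySem.Int.ofChars?` delegates digit parsing to a private helper. This theorem captures that
-- helper (and its accumulator-level recursion) as existentially quantified functions, pinned to
-- the actual private definitions by `rfl`-unification, so later proofs can compute with them.
theorem pvCapture : ∃ (F : List Char → Option Nat) (G : List Char → Bool → Nat → Option Nat)
    (E : Char → List Char → Bool → Nat → Option Nat) (E' : Char → List Char → Option Nat),
    (∀ b acc, G [] b acc = if b = true then some acc else none) ∧
    (∀ c ds b acc, G (c :: ds) b acc =
        if c.isDigit = true then G ds true (acc * 10 + (c.toNat - '0'.toNat)) else E c ds b acc) ∧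
    (F [] = none) ∧
    (∀ c ds, F (c :: ds) =
        if c.isDigit = true then G ds true (0 * 10 + (c.toNat - '0'.toNat)) else E' c ds) ∧
    (∀ cs, PySem.Int.ofChars? cs =
      PySem.Int.ofChars?.match_1 (fun _ => Option Int)
        ((List.dropWhile PySem.Int.isIntSpace (List.dropWhile PySem.Int.isIntSpace cs).reverse).reverse)
        (fun ds => Option.map (fun n => -n) ((F ds).bind fun a => pure (a : Int)))
        (fun ds => Option.map (fun n => n) ((F ds).bind fun a => pure (a : Int)))
        (fun ds => Option.map (fun n => n) ((F ds).bind fun a => pure (a : Int)))) := by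
  exact ⟨_, _, _, _, fun b acc => rfl, fun c ds b acc => rfl, rfl, fun c ds => rfl, fun cs => rfl⟩

-- int(str(n)) == n, at the character level.
theorem pvRoundChars (n : Int) : PySem.Int.ofChars? (PySem.Int.toChars n) = some n := by
  obtain ⟨F, G, E, E', hG0, hGc, hF0, hFc, hOf⟩ := pvCapture
  -- a digit character is not int-whitespace
  have hdig : ∀ (c : Char), c.isDigit = true → PySem.Int.isIntSpace c = false := by
    intro c hc
    simp only [Char.isDigit, decide_eq_true_eq, Bool.and_eq_true] at hc
    simp only [PySem.Int.isIntSpace, Bool.or_eq_false_iff, decide_eq_false_iff_not]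
    refine ⟨⟨⟨⟨⟨?_, ?_⟩, ?_⟩, ?_⟩, ?_⟩, ?_⟩ <;>
      (intro hh; subst hh; revert hc; decide)
  have hstripAux : ∀ (ds : List Char), (∀ c ∈ ds, PySem.Int.isIntSpace c = false) →
      List.dropWhile PySem.Int.isIntSpace ds = ds := by
    intro ds hds
    cases ds with
    | nil => rfl
    | cons c t =>
      rw [List.dropWhile_cons_of_neg]
      simp [hds c List.mem_cons_self]
  have hstrip : ∀ (cs : List Char), (∀ c ∈ cs, PySem.Int.isIntSpace c = false) →
      (List.dropWhile PySem.Int.isIntSpace (List.dropWhile PySem.Int.isIntSpace cs).reverse).reverse = cs := by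
    intro cs hcs
    rw [hstripAux cs hcs, hstripAux cs.reverse (by intro c hc; exact hcs c (List.mem_reverse.1 hc)),
      List.reverse_reverse]
  -- digit run
  have hGdig : ∀ (ds : List Char), (∀ c ∈ ds, c.isDigit = true) → ∀ acc,
      G ds true acc = some (ds.foldl (fun a c => a * 10 + (c.toNat - '0'.toNat)) acc) := by
    intro ds
    induction ds with
    | nil => intro _ acc; rw [hG0]; simp
    | cons c t ih =>
      intro hds acc
      rw [hGc, if_pos (hds c List.mem_cons_self), List.foldl_cons]
      exact ih (fun x hx => hds x (List.mem_cons_of_mem _ hx)) _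
  have hdigitCharVal : ∀ k : Nat, k < 10 → (Nat.digitChar k).toNat - '0'.toNat = k := by
    intro k hk; interval_cases k <;> decide
  have hVal : ∀ m : Nat, ∀ acc : Nat,
      (Nat.toDigits 10 m).foldl (fun a c => a * 10 + (c.toNat - '0'.toNat)) acc
        = acc * 10 ^ (Nat.toDigits 10 m).length + m := by
    intro m
    induction m using Nat.strong_induction_on with
    | _ m ih =>
      intro acc
      by_cases hm : m < 10
      · rw [Nat.toDigits_of_lt_base hm]
        simp [List.foldl]
        simpa using hdigitCharVal m hm
      · have h10 : 10 ≤ m := le_of_not_gt hm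
        rw [Nat.toDigits_of_base_le (by norm_num) h10]
        rw [List.foldl_append, List.foldl_cons, List.foldl_nil]
        rw [ih (m / 10) (Nat.div_lt_self (by omega) (by norm_num)) acc]
        rw [hdigitCharVal (m % 10) (Nat.mod_lt _ (by norm_num))]
        rw [List.length_append, List.length_singleton, pow_succ]
        have hdm := Nat.div_add_mod m 10
        set p := 10 ^ (Nat.toDigits 10 (m / 10)).length with hp
        calc (acc * p + m / 10) * 10 + m % 10
            = acc * (p * 10) + (10 * (m / 10) + m % 10) := by ring
          _ = acc * (p * 10) + m := by rw [hdm]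
  have hall : ∀ m : Nat, ∀ c ∈ Nat.toDigits 10 m, c.isDigit = true :=
    fun m c hc => Nat.isDigit_of_mem_toDigits (by norm_num) (by norm_num) hc
  have hMain : ∀ m : Nat, F (Nat.toDigits 10 m) = some m := by
    intro m
    obtain ⟨d, t, hdt⟩ : ∃ d t, Nat.toDigits 10 m = d :: t := by
      cases hh : Nat.toDigits 10 m with
      | nil =>
        have := Nat.length_toDigits_pos (b := 10) (n := m)
        rw [hh] at this; simp at this
      | cons d t => exact ⟨d, t, rfl⟩
    have hd : d.isDigit = true := hall m d (by rw [hdt]; exact List.mem_cons_self)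
    rw [hdt, hFc, if_pos hd]
    rw [hGdig t (fun x hx => hall m x (by rw [hdt]; exact List.mem_cons_of_mem _ hx))]
    have hfold : t.foldl (fun a c => a * 10 + (c.toNat - '0'.toNat)) (0 * 10 + (d.toNat - '0'.toNat))
        = (Nat.toDigits 10 m).foldl (fun a c => a * 10 + (c.toNat - '0'.toNat)) 0 := by
      rw [hdt, List.foldl_cons]
    rw [hfold, hVal m 0]
    simp
  -- now assemble
  by_cases hn : 0 ≤ n
  · have ht : PySem.Int.toChars n = Nat.toDigits 10 n.toNat := by
      simp [PySem.Int.toChars, not_lt.mpr hn]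
    rw [ht, hOf, hstrip _ (fun c hc => hdig c (hall _ c hc))]
    obtain ⟨d, t, hdt⟩ : ∃ d t, Nat.toDigits 10 n.toNat = d :: t := by
      cases hh : Nat.toDigits 10 n.toNat with
      | nil =>
        have := Nat.length_toDigits_pos (b := 10) (n := n.toNat)
        rw [hh] at this; simp at this
      | cons d t => exact ⟨d, t, rfl⟩
    have hd : d.isDigit = true := hall n.toNat d (by rw [hdt]; exact List.mem_cons_self)
    rw [hdt]
    split
    case _ ds heq =>
      exfalso
      injection heq with h1 h2
      subst h1
      exact absurd hd (by decide)
    case _ ds heq =>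
      exfalso
      injection heq with h1 h2
      subst h1
      exact absurd hd (by decide)
    case _ =>
      rw [← hdt, hMain n.toNat]
      simp [Int.toNat_of_nonneg hn]
  · have hn' : n < 0 := by omega
    have ht : PySem.Int.toChars n = '-' :: Nat.toDigits 10 n.natAbs := by
      simp [PySem.Int.toChars, hn']
    rw [ht, hOf, hstrip _ ?hns]
    case hns =>
      intro c hc
      rcases List.mem_cons.1 hc with h1 | h1
      · subst h1; decide
      · exact hdig c (hall _ c h1)
    split
    case _ ds heq =>
      injection heq with h1 h2
      subst h2
      rw [hMain n.natAbs]
      have hnn : ((n.natAbs : Int)) = -n := by omega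
      simp [hnn]
    case _ ds heq =>
      exfalso
      injection heq with h1 h2
      exact absurd h1 (by decide)
    case _ h1 h2 =>
      exfalso
      exact h1 (Nat.toDigits 10 n.natAbs) rfl

theorem pvRoundStr (n : Int) : PySem.Int.ofStr? (PySem.Int.toStr n) = some n := by
  rw [PySem.Int.ofStr?.eq_1, PySem.Int.toList_toStr]; exact pvRoundChars n

-- PySem's fuel-based splitter on a one-character separator is Mathlib's `List.splitOn`.
theorem pvSplitGoEq (c0 : Char) : ∀ (fuel : Nat) (l cur : List Char) (acc : List (List Char)),
    l.length < fuel →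
    PySem.Chars.splitOn.go [c0] fuel l cur acc
      = acc.reverse ++ (List.splitOnP (· == c0) l).modifyHead (cur.reverse ++ ·) := by
  intro fuel
  induction fuel with
  | zero => intro l cur acc h; omega
  | succ fuel ih =>
    intro l cur acc h
    cases l with
    | nil =>
      rw [PySem.Chars.splitOn.go.eq_def]
      simp [List.splitOnP_nil]
    | cons c rest =>
      rw [PySem.Chars.splitOn.go.eq_def]
      simp only [List.length_singleton, List.drop_succ_cons, List.drop_zero]
      have hpre : List.isPrefixOf [c0] (c :: rest) = (c0 == c) := by
        simp [List.isPrefixOf]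
      by_cases hc : c0 = c
      · subst hc
        rw [if_pos (by simpa using hpre)]
        rw [ih rest [] (cur.reverse :: acc) (by simpa using Nat.lt_of_succ_lt_succ h)]
        rw [List.splitOnP_cons]
        simp only [beq_self_eq_true, if_pos, List.reverse_cons, List.reverse_nil, List.nil_append,
          List.modifyHead_cons, List.append_assoc, List.singleton_append]
        have : (fun x : List Char => x) = id := rfl
        rw [this, List.modifyHead_id, id_eq]
        simp
      · have hne : [c0].isPrefixOf (c :: rest) = false := by rw [hpre]; exact beq_eq_false_iff_ne.2 hc
        rw [if_neg (by simp [hne])]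
        rw [ih rest (c :: cur) acc (by simpa using Nat.lt_of_succ_lt_succ h)]
        rw [List.splitOnP_cons]
        have hcc : (c == c0) = false := beq_eq_false_iff_ne.2 (fun hh => hc hh.symm)
        rw [hcc]
        simp [List.modifyHead_modifyHead]
        rfl

theorem pvSplitOnEq (cs : List Char) (c0 : Char) :
    PySem.Chars.splitOn cs [c0] = List.splitOn c0 cs := by
  rw [show PySem.Chars.splitOn cs [c0] = PySem.Chars.splitOn.go [c0] (cs.length + 1) cs [] [] from rfl]
  rw [pvSplitGoEq c0 (cs.length + 1) cs [] [] (by omega)]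
  have : (fun x : List Char => [].reverse ++ x) = id := by funext x; simp
  rw [this, List.modifyHead_id]
  simp [List.splitOn]

theorem pvSplitOnPFree (p : Char → Bool) : ∀ (l piece : List Char),
    piece ∈ List.splitOnP p l → ∀ a ∈ piece, p a = false := by
  intro l
  induction l with
  | nil =>
    intro piece h a ha
    rw [List.splitOnP_nil] at h
    simp at h
    subst h
    simp at ha
  | cons x xs ih =>
    intro piece h a ha
    rw [List.splitOnP_cons] at h
    by_cases hx : p x = true
    · rw [if_pos hx] at h
      rcases List.mem_cons.1 h with h1 | h1
      · subst h1; simp at ha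
      · exact ih piece h1 a ha
    · rw [if_neg hx] at h
      obtain ⟨hd, tl, hsp⟩ : ∃ hd tl, List.splitOnP p xs = hd :: tl := by
        cases hh : List.splitOnP p xs with
        | nil => exact absurd hh (List.splitOnP_ne_nil p xs)
        | cons a b => exact ⟨a, b, rfl⟩
      rw [hsp, List.modifyHead_cons] at h
      rcases List.mem_cons.1 h with h1 | h1
      · subst h1
        rcases List.mem_cons.1 ha with h2 | h2
        · subst h2; simpa using hx
        · exact ih hd (by rw [hsp]; exact List.mem_cons_self) a h2
      · exact ih piece (by rw [hsp]; exact List.mem_cons_of_mem _ h1) a ha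

theorem pvSplitOnFree (l piece : List Char) (h : piece ∈ List.splitOn '.' l) : '.' ∉ piece := by
  intro hmem
  have := pvSplitOnPFree (· == '.') l piece h '.' hmem
  simp at this

theorem pvSplitStr (s : String) :
    PySem.Str.split? s "." = some ((List.splitOn '.' s.toList).map String.ofList) := by
  have hdot : (".": String).toList = ['.'] := by decide
  rw [PySem.Str.split?.eq_1, hdot]
  rw [show PySem.Chars.split? s.toList ['.'] = some (PySem.Chars.splitOn s.toList ['.']) from rfl]
  rw [pvSplitOnEq]
  rfl

theorem pvJoinSplit (qs : List (List Char)) (h : ∀ l ∈ qs, '.' ∉ l) (h2 : qs ≠ []) :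
    PySem.Str.split? (PySem.Str.join "." (qs.map String.ofList)) "." = some (qs.map String.ofList) := by
  rw [pvSplitStr]
  have htl : (PySem.Str.join "." (qs.map String.ofList)).toList = ['.'].intercalate qs := by
    rw [PySem.Str.toList_join]
    have hdot : (".": String).toList = ['.'] := by decide
    rw [hdot]
    have : (qs.map String.ofList).map String.toList = qs := by
      rw [List.map_map]
      have : String.toList ∘ String.ofList = id := by funext x; simp [String.toList_ofList]
      rw [this, List.map_id]
    rw [this]
    rfl
  rw [htl, List.splitOn_intercalate qs '.' h h2]

theorem pvToCharsNoDot (n : Int) : '.' ∉ PySem.Int.toChars n := by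
  intro hmem
  have hd : ∀ m : Nat, '.' ∉ Nat.toDigits 10 m := by
    intro m hm
    have := Nat.isDigit_of_mem_toDigits (b := 10) (n := m) (by norm_num) (by norm_num) hm
    simp [Char.isDigit] at this
  simp only [PySem.Int.toChars] at hmem
  split at hmem
  · rcases List.mem_cons.1 hmem with h1 | h1
    · exact absurd h1 (by decide)
    · exact hd _ h1
  · exact hd _ hmem

theorem pvGetD (xs : List String) (d : String) (h : 2 ≤ xs.length) :
    PySem.List.pyGetD xs (-2) d = xs[xs.length - 2]'(by omega) := by
  have h2 : -(xs.length : Int) ≤ -2 := by omega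
  simp [PySem.List.pyGetD, PySem.List.pyGet?, PySem.List.pyIdx?, h2]
  rw [List.getElem?_eq_getElem (by omega)]
  rfl

theorem pvSetD (xs : List String) (v : String) (h : 2 ≤ xs.length) :
    PySem.List.pySetD xs (-2) v = xs.set (xs.length - 2) v := by
  have h2 : -(xs.length : Int) ≤ -2 := by omega
  simp [PySem.List.pySetD, PySem.List.pySet?, PySem.List.pyIdx?, h2]


-- Invariant of A's loop: from iteration 1 on, the current string is the original fields with the
-- second-to-last replaced by str(b0+j), and the accumulator lists the input followed by those strings.
theorem pvLoop (oid : String) (P : List (List Char)) (b0 : Int)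
    (hsplit : PySem.Str.split? oid "." = some (P.map String.ofList))
    (hb0 : PySem.Int.ofStr? (PySem.List.pyGetD (P.map String.ofList) (-2) "") = some b0)
    (hlen : 2 ≤ P.length) (hPfree : ∀ l ∈ P, '.' ∉ l) :
    ∀ j : Nat, 1 ≤ j →
      (PySem.List.pyRange 0 (j : Int) 1).foldl
        (fun st (_ : Int) =>
          let result := st.1 ++ [st.2]
          let parts := (PySem.Str.split? st.2 ".").getD []
          let v := (PySem.Int.ofStr? (PySem.List.pyGetD parts (-2) "")).getD 0
          let parts2 := PySem.List.pySetD parts (-2) (PySem.Int.toStr (v + 1))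
          (result, PySem.Str.join "." parts2))
        ([], oid)
      = (oid :: (PySem.List.pyRange 1 (j : Int) 1).map
            (fun i => PySem.Str.join "."
              ((P.set (P.length - 2) (PySem.Int.toChars (b0 + i))).map String.ofList)),
         PySem.Str.join "."
            ((P.set (P.length - 2) (PySem.Int.toChars (b0 + (j : Int)))).map String.ofList)) := by
  have hQfree : ∀ (i : Int), ∀ l ∈ P.set (P.length - 2) (PySem.Int.toChars (b0 + i)), '.' ∉ l := by
    intro i l hl
    rcases List.mem_or_eq_of_mem_set hl with h | h
    · exact hPfree l h
    · subst h; exact pvToCharsNoDot _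
  have hQne : ∀ (i : Int), P.set (P.length - 2) (PySem.Int.toChars (b0 + i)) ≠ [] := by
    intro i h
    have h2 : (P.set (P.length - 2) (PySem.Int.toChars (b0 + i))).length = 0 := by
      rw [h]; rfl
    rw [List.length_set] at h2
    omega
  have hsetP : ∀ (v : String), PySem.List.pySetD (P.map String.ofList) (-2) v
      = (P.map String.ofList).set (P.length - 2) v := by
    intro v
    rw [pvSetD _ _ (by simpa using hlen)]
    simp
  have hsetQ : ∀ (i : Int) (v : String),
      PySem.List.pySetD ((P.set (P.length - 2) (PySem.Int.toChars (b0 + i))).map String.ofList) (-2) v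
      = ((P.set (P.length - 2) (PySem.Int.toChars (b0 + i))).map String.ofList).set (P.length - 2) v := by
    intro i v
    rw [pvSetD _ _ (by simp; omega)]
    simp
  have hgetQ : ∀ (i : Int),
      PySem.List.pyGetD ((P.set (P.length - 2) (PySem.Int.toChars (b0 + i))).map String.ofList) (-2) ""
      = PySem.Int.toStr (b0 + i) := by
    intro i
    rw [pvGetD _ _ (by simp; omega)]
    rw [PySem.Int.toStr.eq_1]
    simp
  intro j hj
  induction j, hj using Nat.le_induction with
  | base =>
    have h01 : PySem.List.pyRange 0 ((1 : Nat) : Int) 1 = [0] := by decide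
    have h11 : PySem.List.pyRange 1 ((1 : Nat) : Int) 1 = [] := by decide
    rw [h01, h11, List.foldl_cons, List.foldl_nil]
    simp only [hsplit, Option.getD_some, hb0, hsetP, List.map_nil]
    rw [PySem.Int.toStr.eq_1, ← List.map_set]
    simp
  | succ j hj ih =>
    have hc1 : ((j + 1 : Nat) : Int) = (j : Int) + 1 := by push_cast; ring
    have hc0 : (0 : Int) ≤ (j : Int) := by positivity
    have hc2 : (1 : Int) ≤ (j : Int) := by exact_mod_cast hj
    rw [hc1, PySem.List.pyRange_one_succ_right hc0, List.foldl_append, ih,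
      PySem.List.pyRange_one_succ_right hc2, List.foldl_cons, List.foldl_nil]
    simp only [pvJoinSplit _ (hQfree (j : Int)) (hQne (j : Int)), Option.getD_some, hgetQ,
      pvRoundStr, hsetQ, List.map_append]
    rw [PySem.Int.toStr.eq_1, ← List.map_set, List.set_set]
    have : b0 + (j : Int) + 1 = b0 + ((j : Int) + 1) := by ring
    rw [this]
    simp

-- ===== VERDICT (by name: the statement is the Claim_ definition above) =====
theorem get_next_oids_spec : Claim_equal_get_next_oids := by
  intro oid count _hdom hpre
  unfold Spec_get_next_oids get_next_oids get_next_oids_alt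
  by_cases hc : count ≤ 0
  · rw [if_pos hc]
    have hr : PySem.List.pyRange 0 count 1 = [] := by
      have h1 : ¬ ((0 : Int) < count) := by omega
      simp [PySem.List.pyRange, h1]
    rw [hr]
    simp
  · have hpos : 0 < count := by omega
    obtain ⟨hlen, hsome⟩ := hpre hpos
    rw [if_neg hc]
    have hsplit := pvSplitStr oid
    obtain ⟨b0, hb0⟩ := Option.isSome_iff_exists.mp hsome
    rw [hsplit] at hlen hb0
    simp only [Option.getD_some] at hlen hb0
    have hlen' : 2 ≤ (List.splitOn '.' oid.toList).length := by simpa using hlen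
    have hcast : ((count.toNat : Nat) : Int) = count := Int.toNat_of_nonneg (by omega)
    rw [← hcast]
    rw [pvLoop oid (List.splitOn '.' oid.toList) b0 hsplit hb0 hlen'
      (fun l hl => pvSplitOnFree _ l hl) count.toNat (by omega)]
    simp only [hsplit, Option.getD_some, hb0]
    rw [PySem.List.foldl_append_singleton_eq_map]
    have hsetP : ∀ (v : String),
        PySem.List.pySetD ((List.splitOn '.' oid.toList).map String.ofList) (-2) v
        = ((List.splitOn '.' oid.toList).map String.ofList).set
            ((List.splitOn '.' oid.toList).length - 2) v := by
      intro v
      rw [pvSetD _ _ (by simpa using hlen')]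
      simp
    simp only [hsetP]
    simp only [PySem.Int.toStr.eq_1, ← List.map_set]
    simp
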